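-- pv_equiv track=rewrite | github.com/qn06142/coding-python | fcb001_color.py | count_ways_to_color
-- ===== SOURCE A (Python) =====
-- def count_ways_to_color(N, K):
--     MOD = 10**9 + 7
--
--     if N == 1:
--         return K % MOD
--
--     dp = K % MOD
--
--     for i in range(1, N):
--         dp = (dp * (K - 1)) % MOD
--
--     return dp
-- ===== SOURCE B (Python) =====
-- def count_ways_to_color(N, K):
--     MOD = 10**9 + 7
--     e = N - 1
--     if e < 1:
--         return K % MOD
--     result = 1
--     base = (K - 1) % MOD
--     while e > 0:
--         if e & 1:
--             result = result * base % MOD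
--         base = base * base % MOD
--         e >>= 1
--     return (K % MOD) * result % MOD
-- ===== Notes on version B (the rewrite author's own statement) =====
-- stated objective: faster
-- what changed: Replaces the N-1 linear modular multiplications with exponentiation by squaring over the bits of N-1.
import Mathlib
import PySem

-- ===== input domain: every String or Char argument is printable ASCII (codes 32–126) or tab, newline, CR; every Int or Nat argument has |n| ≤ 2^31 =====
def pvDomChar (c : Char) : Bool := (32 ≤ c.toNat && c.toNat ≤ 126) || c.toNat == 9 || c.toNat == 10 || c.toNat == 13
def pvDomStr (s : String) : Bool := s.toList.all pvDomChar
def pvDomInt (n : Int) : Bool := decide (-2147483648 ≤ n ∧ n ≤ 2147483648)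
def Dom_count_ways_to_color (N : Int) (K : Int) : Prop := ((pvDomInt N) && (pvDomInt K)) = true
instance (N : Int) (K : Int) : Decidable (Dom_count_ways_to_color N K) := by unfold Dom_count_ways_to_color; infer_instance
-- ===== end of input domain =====

-- B replaces A's N-1 sequential modular multiplications with binary exponentiation (square-and-multiply over the bits of N-1).

-- ===== PORT A =====
-- literal transliteration of A: N == 1 early return, then dp-loop over range(1, N)
def count_ways_to_color (N : Int) (K : Int) : Int :=
  let MOD : Int := 10 ^ 9 + 7
  if N = 1 then PySem.Int.mod K MOD
  else
    (PySem.List.pyRange 1 N 1).foldl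
      (fun dp _ => PySem.Int.mod (dp * (K - 1)) MOD)
      (PySem.Int.mod K MOD)

-- ===== PORT B =====
-- the while-loop of Source B: state (result, base), exponent e halved each step; terminates since e.toNat decreases
def pvPowLoop (e result base : Int) : Int :=
  if h : 0 < e then
    pvPowLoop (PySem.Int.floordiv e 2)
      (if PySem.Int.mod e 2 = 1 then PySem.Int.mod (result * base) (10 ^ 9 + 7) else result)
      (PySem.Int.mod (base * base) (10 ^ 9 + 7))
  else result
termination_by e.toNat
decreasing_by
  rw [PySem.Int.floordiv_eq_ediv_of_pos (by norm_num)]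
  omega

def count_ways_to_color_alt (N : Int) (K : Int) : Int :=
  let MOD : Int := 10 ^ 9 + 7
  let e := N - 1
  if e < 1 then PySem.Int.mod K MOD
  else
    PySem.Int.mod (PySem.Int.mod K MOD * pvPowLoop e 1 (PySem.Int.mod (K - 1) MOD)) MOD

-- ===== PRECONDITION & SPEC =====
def Spec_count_ways_to_color (N : Int) (K : Int) (out : Int) : Prop := out = count_ways_to_color_alt N K
instance (N : Int) (K : Int) (out : Int) : Decidable (Spec_count_ways_to_color N K out) := by unfold Spec_count_ways_to_color; infer_instance

-- ===== CLAIM (what is proved, stated in full; the proofs are below) =====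
def Claim_equal_count_ways_to_color : Prop := ∀ (N : Int) (K : Int), Dom_count_ways_to_color N K → Spec_count_ways_to_color N K (count_ways_to_color N K)

-- ===== LEMMAS AND PROOFS =====

-- x % M is congruent to x mod M
theorem pvHmod (M x : Int) : Int.ModEq M (x % M) x := Int.emod_emod_of_dvd x dvd_rfl

-- A's loop computes (d * (K-1)^len) % M when started from d % M
theorem pvFoldA (K M : Int) (hM : 0 < M) :
    ∀ (l : List Int) (d : Int),
      l.foldl (fun dp _ => PySem.Int.mod (dp * (K - 1)) M) (PySem.Int.mod d M)
        = (d * (K - 1) ^ l.length) % M := by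
  intro l
  induction l with
  | nil => intro d; simp [PySem.Int.mod_eq_emod_of_pos hM]
  | cons x l ih =>
    intro d
    have h1 : PySem.Int.mod (PySem.Int.mod d M * (K - 1)) M
        = PySem.Int.mod (d * (K - 1)) M := by
      simp only [PySem.Int.mod_eq_emod_of_pos hM]
      exact (pvHmod M d).mul_right (K - 1)
    simp only [List.foldl_cons, h1, ih]
    rw [List.length_cons, pow_succ]
    ring_nf

-- B's loop is congruent to result * base ^ e.toNat mod M (fuel n bounds e.toNat)
theorem pvPowLoop_emod_aux : ∀ (n : Nat) (e r b : Int), e.toNat ≤ n →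
    pvPowLoop e r b % (10 ^ 9 + 7) = r * b ^ e.toNat % (10 ^ 9 + 7) := by
  intro n
  induction n with
  | zero =>
    intro e r b he
    rw [pvPowLoop.eq_def, dif_neg (by omega)]
    have h0 : e.toNat = 0 := by omega
    simp [h0]
  | succ n ih =>
    intro e r b he
    rw [pvPowLoop.eq_def]
    by_cases h : 0 < e
    · rw [dif_pos h]
      have hfd : PySem.Int.floordiv e 2 = e / 2 := PySem.Int.floordiv_eq_ediv_of_pos (by norm_num)
      have hmd : PySem.Int.mod e 2 = e % 2 := PySem.Int.mod_eq_emod_of_pos (by norm_num)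
      have hmM : ∀ x : Int, PySem.Int.mod x (10 ^ 9 + 7) = x % (10 ^ 9 + 7) := fun x =>
        PySem.Int.mod_eq_emod_of_pos (by norm_num)
      have hle : (e / 2).toNat ≤ n := by omega
      have hsplit : e.toNat = 2 * (e / 2).toNat + (e % 2).toNat := by omega
      by_cases hodd : e % 2 = 1
      · rw [hfd, hmd, if_pos hodd, hmM, hmM, ih _ _ _ hle]
        calc (r * b % (10 ^ 9 + 7)) * (b * b % (10 ^ 9 + 7)) ^ (e / 2).toNat
            ≡ (r * b) * (b * b) ^ (e / 2).toNat [ZMOD (10 ^ 9 + 7)] :=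
              (pvHmod _ _).mul ((pvHmod _ _).pow _)
          _ = r * b ^ e.toNat := by
              rw [hsplit, hodd]; simp only [Int.toNat_one, pow_add, pow_mul, pow_one]; ring
      · rw [hfd, hmd, if_neg hodd, hmM, ih _ _ _ hle]
        have he0 : (e % 2).toNat = 0 := by omega
        calc r * (b * b % (10 ^ 9 + 7)) ^ (e / 2).toNat
            ≡ r * (b * b) ^ (e / 2).toNat [ZMOD (10 ^ 9 + 7)] :=
              (Int.ModEq.refl r).mul ((pvHmod _ _).pow _)
          _ = r * b ^ e.toNat := by rw [hsplit, he0]; ring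
    · rw [dif_neg h]
      have h0 : e.toNat = 0 := by omega
      simp [h0]

theorem pvPowLoop_emod (e r b : Int) :
    pvPowLoop e r b % (10 ^ 9 + 7) = r * b ^ e.toNat % (10 ^ 9 + 7) :=
  pvPowLoop_emod_aux e.toNat e r b le_rfl

-- closed form for A, every N K
theorem pvA_closed (N K : Int) :
    count_ways_to_color N K = K * (K - 1) ^ (N - 1).toNat % (10 ^ 9 + 7) := by
  unfold count_ways_to_color
  have hM : (0:Int) < 10 ^ 9 + 7 := by norm_num
  by_cases h1 : N = 1
  · subst h1
    norm_num [PySem.Int.mod_eq_emod_of_pos hM]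
  · rw [if_neg h1, pvFoldA K _ hM, PySem.List.length_pyRange_one]

-- closed form for B, every N K
theorem pvB_closed (N K : Int) :
    count_ways_to_color_alt N K = K * (K - 1) ^ (N - 1).toNat % (10 ^ 9 + 7) := by
  unfold count_ways_to_color_alt
  have hM : (0:Int) < 10 ^ 9 + 7 := by norm_num
  by_cases h1 : N - 1 < 1
  · rw [if_pos h1]
    have h0 : (N - 1).toNat = 0 := by omega
    rw [h0, PySem.Int.mod_eq_emod_of_pos hM]
    norm_num
  · rw [if_neg h1]
    simp only [PySem.Int.mod_eq_emod_of_pos hM]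
    calc (K % (10 ^ 9 + 7)) * pvPowLoop (N - 1) 1 ((K - 1) % (10 ^ 9 + 7))
        ≡ K * (1 * ((K - 1) % (10 ^ 9 + 7)) ^ (N - 1).toNat) [ZMOD (10 ^ 9 + 7)] :=
          (pvHmod _ _).mul (pvPowLoop_emod (N - 1) 1 ((K - 1) % (10 ^ 9 + 7)))
      _ ≡ K * (1 * (K - 1) ^ (N - 1).toNat) [ZMOD (10 ^ 9 + 7)] :=
          (Int.ModEq.refl K).mul ((Int.ModEq.refl 1).mul ((pvHmod _ _).pow _))
      _ = K * (K - 1) ^ (N - 1).toNat := by ring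

-- ===== VERDICT (by name: the statement is the Claim_ definition above) =====
theorem count_ways_to_color_spec : Claim_equal_count_ways_to_color := by
  intro N K _
  unfold Spec_count_ways_to_color
  rw [pvA_closed, pvB_closed]
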